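-- pv_equiv track=rewrite | github.com/matthewsantoro/seating-for-the-mafia | seating for the mafia/program.py | get_players_with_minimal_slot
-- ===== SOURCE A (Python) =====
-- def get_players_with_minimal_slot(pos_slot: int, players: list) -> list:
--     '''
--     Возращает список игроков, кто меньше всего играл на данной позиции
--     '''
--     players_with_min_slot = []
--     min_slot = 100
--     for i, player in enumerate(players):
--         if min_slot > player['position'][pos_slot]:
--             players_with_min_slot = [player]
--             min_slot = player['position'][pos_slot]
--         elif min_slot == player['position'][pos_slot]:
--             players_with_min_slot.append(player)
--     return players_with_min_slot
-- ===== SOURCE B (Python) =====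
-- def get_players_with_minimal_slot(pos_slot: int, players: list) -> list:
--     '''
--     Возращает список игроков, кто меньше всего играл на данной позиции
--     '''
--     m = min([100] + [p['position'][pos_slot] for p in players])
--     return [p for p in players if p['position'][pos_slot] == m]
-- ===== Notes on version B (the rewrite author's own statement) =====
-- stated objective: simpler
-- what changed: Replaces A's single running-min loop that rebuilds/appends-to the result with list resets by a two-pass min-then-filter: first compute the minimum slot value (capped at A's 100 start value, which also yields the empty result when every value exceeds 100), then filter the players attaining it.
import Mathlib
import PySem

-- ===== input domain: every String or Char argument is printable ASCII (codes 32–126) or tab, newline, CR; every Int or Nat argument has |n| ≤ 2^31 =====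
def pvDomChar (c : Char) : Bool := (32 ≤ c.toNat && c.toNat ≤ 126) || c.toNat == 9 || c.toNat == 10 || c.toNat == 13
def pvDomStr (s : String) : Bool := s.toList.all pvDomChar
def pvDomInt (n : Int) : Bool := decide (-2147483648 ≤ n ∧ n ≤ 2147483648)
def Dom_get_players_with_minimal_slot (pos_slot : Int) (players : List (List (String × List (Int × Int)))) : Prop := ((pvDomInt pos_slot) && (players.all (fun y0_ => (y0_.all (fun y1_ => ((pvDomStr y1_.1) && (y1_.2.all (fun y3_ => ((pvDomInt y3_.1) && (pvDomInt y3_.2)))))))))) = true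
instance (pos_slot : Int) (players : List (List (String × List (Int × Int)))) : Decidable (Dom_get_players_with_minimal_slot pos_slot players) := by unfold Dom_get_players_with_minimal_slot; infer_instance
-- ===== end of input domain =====

-- B replaces A's running-min loop (with its reset/append state machine) by a two-pass
-- min-then-filter; objective: simpler. Pre_ excludes the KeyError inputs (missing
-- 'position' key or missing pos_slot key), where both Pythons raise.

-- ===== PORT A =====
-- player['position'][pos_slot]: two first-match dict lookups; the `none` (KeyError)
-- cases are excluded by Pre_, the defaults are never reached under it.
def pvSlot (pos_slot : Int) (player : List (String × List (Int × Int))) : Int :=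
  (((player.lookup "position").getD []).lookup pos_slot).getD 0

def get_players_with_minimal_slot (pos_slot : Int) (players : List (List (String × List (Int × Int)))) : List (List (String × List (Int × Int))) :=
  (players.foldl
    (fun (st : List (List (String × List (Int × Int))) × Int) player =>
      if pvSlot pos_slot player < st.2 then ([player], pvSlot pos_slot player)
      else if st.2 = pvSlot pos_slot player then (st.1 ++ [player], st.2)
      else st)
    ([], 100)).1

-- ===== PORT B =====
def get_players_with_minimal_slot_alt (pos_slot : Int) (players : List (List (String × List (Int × Int)))) : List (List (String × List (Int × Int))) :=
  let m := (PySem.List.min? ((100 : Int) :: players.map (pvSlot pos_slot)) (fun y => y)).getD 100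
  players.filter (fun p => pvSlot pos_slot p == m)

-- ===== PRECONDITION & SPEC =====
-- Pre_ excludes exactly the inputs where Python raises KeyError: a player without a
-- 'position' key, or whose position dict has no key pos_slot (both A and B raise there).
def Pre_get_players_with_minimal_slot (pos_slot : Int) (players : List (List (String × List (Int × Int)))) : Prop :=
  ∀ player ∈ players, ((player.lookup "position").bind (fun l => l.lookup pos_slot)).isSome = true
instance (pos_slot : Int) (players : List (List (String × List (Int × Int)))) : Decidable (Pre_get_players_with_minimal_slot pos_slot players) := by unfold Pre_get_players_with_minimal_slot; infer_instance

def pvWitness_get_players_with_minimal_slot : Int × (List (List (String × List (Int × Int)))) :=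
  (0, [[("position", [(0, 3), (1, 5)])], [("position", [(0, 3)])]])

def Spec_get_players_with_minimal_slot (pos_slot : Int) (players : List (List (String × List (Int × Int)))) (out : List (List (String × List (Int × Int)))) : Prop := out = get_players_with_minimal_slot_alt pos_slot players
instance (pos_slot : Int) (players : List (List (String × List (Int × Int)))) (out : List (List (String × List (Int × Int)))) : Decidable (Spec_get_players_with_minimal_slot pos_slot players out) := by unfold Spec_get_players_with_minimal_slot; infer_instance

-- ===== CLAIM (what is proved, stated in full; the proofs are below) =====
def Claim_equal_get_players_with_minimal_slot : Prop := ∀ (pos_slot : Int) (players : List (List (String × List (Int × Int)))), Dom_get_players_with_minimal_slot pos_slot players → Pre_get_players_with_minimal_slot pos_slot players → Spec_get_players_with_minimal_slot pos_slot players (get_players_with_minimal_slot pos_slot players)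

-- ===== LEMMAS AND PROOFS =====

-- Invariant of A's loop: from state (acc, m) it ends in the running min M of m and the
-- remaining values, with result = (acc if M = m else []) ++ the players attaining M.
theorem pvLoopA_eq (pos_slot : Int) (l : List (List (String × List (Int × Int))))
    (acc : List (List (String × List (Int × Int)))) (m : Int) :
    l.foldl
      (fun (st : List (List (String × List (Int × Int))) × Int) player =>
        if pvSlot pos_slot player < st.2 then ([player], pvSlot pos_slot player)
        else if st.2 = pvSlot pos_slot player then (st.1 ++ [player], st.2)
        else st)
      (acc, m)
    = (((if (l.map (pvSlot pos_slot)).foldl min m = m then acc else []) ++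
          l.filter (fun p => pvSlot pos_slot p == (l.map (pvSlot pos_slot)).foldl min m)),
        (l.map (pvSlot pos_slot)).foldl min m) := by
  induction l generalizing acc m with
  | nil => simp
  | cons p t ih =>
    have hmin := PySem.List.foldl_min_le (t.map (pvSlot pos_slot))
    simp only [List.foldl_cons, List.map_cons, List.filter_cons]
    by_cases h1 : pvSlot pos_slot p < m
    · rw [if_pos h1, ih]
      have hmw : min m (pvSlot pos_slot p) = pvSlot pos_slot p := min_eq_right (le_of_lt h1)
      have hM := (hmin (pvSlot pos_slot p)).1
      simp only [hmw]
      have hne : ¬ (t.map (pvSlot pos_slot)).foldl min (pvSlot pos_slot p) = m := by omega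
      rw [if_neg hne]
      by_cases h2 : (t.map (pvSlot pos_slot)).foldl min (pvSlot pos_slot p) = pvSlot pos_slot p
      · simp [h2]
      · have : (pvSlot pos_slot p == (t.map (pvSlot pos_slot)).foldl min (pvSlot pos_slot p)) = false := by
          simp; omega
        simp [h2, this]
    · rw [if_neg h1]
      by_cases h2 : m = pvSlot pos_slot p
      · rw [if_pos h2, ih]
        have hmw : min m (pvSlot pos_slot p) = m := by omega
        simp only [hmw]
        by_cases h3 : (t.map (pvSlot pos_slot)).foldl min m = m
        · simp [h3]
          omega
        · have : (pvSlot pos_slot p == (t.map (pvSlot pos_slot)).foldl min m) = false := by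
            simp; omega
          simp [h3, this]
      · rw [if_neg h2, ih]
        have hmw : min m (pvSlot pos_slot p) = m := by omega
        simp only [hmw]
        have hM := (hmin m).1
        have : (pvSlot pos_slot p == (t.map (pvSlot pos_slot)).foldl min m) = false := by
          simp; omega
        simp [this]

-- ===== VERDICT (by name: the statement is the Claim_ definition above) =====
theorem get_players_with_minimal_slot_spec : Claim_equal_get_players_with_minimal_slot := by
  intro pos_slot players _ _
  unfold Spec_get_players_with_minimal_slot
  unfold get_players_with_minimal_slot get_players_with_minimal_slot_alt
  rw [pvLoopA_eq]
  rw [PySem.List.min?_id_cons]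
  simp
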